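-- pv_equiv track=rewrite | github.com/anton31kah/AdventOfCode | src/year2020/day22/part2.py | read_cards
-- ===== SOURCE A (Python) =====
-- def read_cards(lines):
--     player1_cards, player2_cards = [], []
--
--     flag = True
--
--     for line in lines:
--         if not line:
--             flag = False
--             continue
--         if line.endswith(':'):
--             continue
--         if flag:
--             player1_cards.append(int(line))
--         else:
--             player2_cards.append(int(line))
--
--     return player1_cards, player2_cards
-- ===== SOURCE B (Python) =====
-- def read_cards(lines):
--     lines = list(lines)
--     try:
--         i = lines.index('')
--         block1, block2 = lines[:i], lines[i + 1:]
--     except ValueError: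
--         block1, block2 = lines, []
--     def parse(block):
--         return [int(line) for line in block if line and not line.endswith(':')]
--     return parse(block1), parse(block2)
-- ===== Notes on version B (the rewrite author's own statement) =====
-- stated objective: simpler
-- what changed: Replaces the single loop with a mutable flag by splitting the lines at the first empty line into two blocks and building each player's list with one filtered int() comprehension per block.
import Mathlib
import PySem

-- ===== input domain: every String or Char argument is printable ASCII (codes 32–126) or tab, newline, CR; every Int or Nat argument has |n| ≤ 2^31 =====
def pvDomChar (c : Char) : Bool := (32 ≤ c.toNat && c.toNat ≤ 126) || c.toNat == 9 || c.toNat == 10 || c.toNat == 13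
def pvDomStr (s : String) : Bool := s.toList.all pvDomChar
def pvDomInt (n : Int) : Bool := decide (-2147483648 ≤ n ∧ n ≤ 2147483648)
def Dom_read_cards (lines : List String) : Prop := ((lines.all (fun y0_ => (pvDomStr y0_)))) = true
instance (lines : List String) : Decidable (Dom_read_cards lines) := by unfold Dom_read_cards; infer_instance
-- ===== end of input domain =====

-- B replaces A's one-pass loop with a mutable flag by splitting the lines at the
-- first empty line into two blocks and parsing each block with one filtered map (objective: simpler).

-- ===== PORT A =====
-- state: (player1_cards, player2_cards, flag)
def pvStepA (s : List Int × List Int × Bool) (line : String) : List Int × List Int × Bool :=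
  if line = "" then (s.1, s.2.1, false)
  else if PySem.Str.endswith line ":" then s
  else if s.2.2 then (s.1 ++ [(PySem.Int.ofStr? line).getD 0], s.2.1, s.2.2)
  else (s.1, s.2.1 ++ [(PySem.Int.ofStr? line).getD 0], s.2.2)

def read_cards (lines : List String) : List Int × List Int :=
  let r := lines.foldl pvStepA ([], [], true)
  (r.1, r.2.1)

-- ===== PORT B =====
-- parse one block: keep non-empty, non-header lines, map int() over them
def pvParse (block : List String) : List Int :=
  (block.filter (fun l => !(l == "") && !PySem.Str.endswith l ":")).map
    (fun l => (PySem.Int.ofStr? l).getD 0)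

def read_cards_alt (lines : List String) : List Int × List Int :=
  let block1 := lines.takeWhile (fun l => !(l == ""))
  let block2 := (lines.dropWhile (fun l => !(l == ""))).drop 1
  (pvParse block1, pvParse block2)

-- ===== PRECONDITION & SPEC =====
-- Pre_ excludes exactly the inputs on which Python's int(line) raises ValueError
-- (a non-blank, non-header line that is not an int literal); both programs raise there.
def Pre_read_cards (lines : List String) : Prop :=
  ∀ l ∈ lines, l ≠ "" → PySem.Str.endswith l ":" = false → (PySem.Int.ofStr? l).isSome = true
instance (lines : List String) : Decidable (Pre_read_cards lines) := by
  unfold Pre_read_cards; infer_instance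
def pvWitness_read_cards : List String := ["Player 1:", "9", "2", "", "Player 2:", "5", "8"]

def Spec_read_cards (lines : List String) (out : List Int × List Int) : Prop := out = read_cards_alt lines
instance (lines : List String) (out : List Int × List Int) : Decidable (Spec_read_cards lines out) := by unfold Spec_read_cards; infer_instance

-- ===== CLAIM (what is proved, stated in full; the proofs are below) =====
def Claim_equal_read_cards : Prop := ∀ (lines : List String), Dom_read_cards lines → Pre_read_cards lines → Spec_read_cards lines (read_cards lines)

-- ===== LEMMAS AND PROOFS =====

lemma pvParse_cons_skip (l : String) (t : List String)
    (h : l = "" ∨ PySem.Chars.endswith l.toList [':'] = true) :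
    pvParse (l :: t) = pvParse t := by
  rcases h with h | h <;> simp [pvParse, h]

lemma pvParse_cons_keep (l : String) (t : List String)
    (hb : ¬ l = "") (he : PySem.Chars.endswith l.toList [':'] = false) :
    pvParse (l :: t) = (PySem.Int.ofStr? l).getD 0 :: pvParse t := by
  simp [pvParse, hb, he]

lemma fold_false (lines : List String) (p1 p2 : List Int) :
    lines.foldl pvStepA (p1, p2, false) = (p1, p2 ++ pvParse lines, false) := by
  induction lines generalizing p2 with
  | nil => simp [pvParse]
  | cons l t ih =>
    by_cases hb : l = ""
    · simp [List.foldl_cons, pvStepA, hb, ih, pvParse_cons_skip "" t (Or.inl rfl)]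
    · by_cases he : PySem.Chars.endswith l.toList [':'] = true
      · simp [List.foldl_cons, pvStepA, hb, he, ih, pvParse_cons_skip l t (Or.inr he)]
      · simp only [Bool.not_eq_true] at he
        simp [List.foldl_cons, pvStepA, hb, he, ih, pvParse_cons_keep l t hb he]

lemma fold_true (lines : List String) (p1 p2 : List Int) :
    (lines.foldl pvStepA (p1, p2, true)).1
      = p1 ++ pvParse (lines.takeWhile (fun l => !(l == ""))) ∧
    (lines.foldl pvStepA (p1, p2, true)).2.1
      = p2 ++ pvParse ((lines.dropWhile (fun l => !(l == ""))).drop 1) := by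
  induction lines generalizing p1 p2 with
  | nil => simp [pvParse]
  | cons l t ih =>
    by_cases hb : l = ""
    · have := fold_false t p1 p2
      simp [List.foldl_cons, pvStepA, hb, this, pvParse]
    · by_cases he : PySem.Chars.endswith l.toList [':'] = true
      · have := ih p1 p2
        simp [List.foldl_cons, pvStepA, hb, he,
              pvParse_cons_skip l _ (Or.inr he), this]
      · simp only [Bool.not_eq_true] at he
        have := ih (p1 ++ [(PySem.Int.ofStr? l).getD 0]) p2
        simp [List.foldl_cons, pvStepA, hb, he,
              pvParse_cons_keep l _ hb he, this]

-- ===== VERDICT (by name: the statement is the Claim_ definition above) =====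
theorem read_cards_spec : Claim_equal_read_cards := by
  intro lines _ _
  unfold Spec_read_cards read_cards read_cards_alt
  have h := fold_true lines [] []
  simp only [List.nil_append] at h
  exact Prod.ext h.1 h.2
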